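-- pv_equiv track=rewrite | github.com/miliar/Code_Jam_Webscraper | Solutions_python/Problem_201/45.py | find_space_for_nth
-- ===== SOURCE A (Python) =====
-- import heapq
--
-- def split_space(space):
--     left = (space - 1) // 2
--     right = space - left - 1
--     return left, right
--
-- def find_space_for_nth(n, num_stalls):
--     counts = {}
--     spaces = []
--
--     def get():
--         return -heapq.heappop(spaces)
--
--     def inc(_space, _count):
--         if _space in counts:
--             counts[_space] += _count
--         else:
--             heapq.heappush(spaces, -_space)
--             counts[_space] = _count
--
--     inc(num_stalls, 1)
--
--     while True:
--         space = get()
--         assert space >= 1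
--         count = counts.pop(space)
--         if count >= n:
--             return space
--         n -= count
--         left_space, right_space = split_space(space)
--         inc(left_space, count)
--         inc(right_space, count)
-- ===== SOURCE B (Python) =====
-- def find_space_for_nth(n, num_stalls):
--     # one dict {gap size -> how many gaps of that size}; the largest size is
--     # taken directly with max() instead of maintaining a heap of negated sizes
--     counts = {num_stalls: 1}
--     while True:
--         s = max(counts)
--         assert s >= 1
--         count = counts.pop(s)
--         if count >= n:
--             return s
--         n -= count
--         left = (s - 1) // 2
--         right = s - left - 1
--         counts[left] = counts.get(left, 0) + count
--         counts[right] = counts.get(right, 0) + count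
-- ===== Notes on version B (the rewrite author's own statement) =====
-- stated objective: simpler
-- what changed: The heapq priority queue of negated sizes with its conditional-push/membership bookkeeping is removed entirely: B keeps a single dict from gap size to count (which this process keeps at three keys or fewer) and selects the current largest gap directly with max(counts) each round.
import Mathlib
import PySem

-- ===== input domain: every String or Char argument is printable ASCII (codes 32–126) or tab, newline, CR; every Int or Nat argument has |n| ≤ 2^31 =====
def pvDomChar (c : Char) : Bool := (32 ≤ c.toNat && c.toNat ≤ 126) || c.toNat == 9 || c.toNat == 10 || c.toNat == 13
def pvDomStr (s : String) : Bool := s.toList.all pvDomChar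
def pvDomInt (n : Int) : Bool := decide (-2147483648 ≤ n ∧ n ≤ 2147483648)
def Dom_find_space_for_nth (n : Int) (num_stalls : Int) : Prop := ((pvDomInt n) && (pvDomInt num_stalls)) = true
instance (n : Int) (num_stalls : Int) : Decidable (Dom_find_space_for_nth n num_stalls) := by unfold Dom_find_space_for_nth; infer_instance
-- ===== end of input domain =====

-- B replaces A's heapq priority queue of negated sizes (with its conditional-push
-- membership bookkeeping) by one plain dict from gap size to count whose largest key is
-- taken directly with max() each round; objective: simpler, same asymptotic cost.


-- ===== PORT A =====
-- heapq._siftdown(heap, startpos, pos) (pure: returns the updated list; newitem = heap[pos])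
def pySiftdown (heap : List Int) (startpos pos : Nat) (newitem : Int) : List Int :=
  if _h : startpos < pos then
    let parentpos := (pos - 1) / 2
    let parent := heap.getD parentpos 0
    if newitem < parent then
      pySiftdown (heap.set pos parent) startpos parentpos newitem
    else
      heap.set pos newitem
  else
    heap.set pos newitem
termination_by pos
decreasing_by omega

-- heapq.heappush(heap, item)
def pyHeappush (heap : List Int) (item : Int) : List Int :=
  pySiftdown (heap ++ [item]) 0 (heap.length) item

-- the while-loop of heapq._siftup (moves the smaller child up; returns the final heap and pos)
def pySiftupLoop (heap : List Int) (pos endpos : Nat) : List Int × Nat :=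
  if _h : 2 * pos + 1 < endpos then
    let childpos := 2 * pos + 1
    let rightpos := childpos + 1
    let childpos :=
      if rightpos < endpos && !(heap.getD childpos 0 < heap.getD rightpos 0) then rightpos
      else childpos
    pySiftupLoop (heap.set pos (heap.getD childpos 0)) childpos endpos
  else
    (heap, pos)
termination_by endpos - pos
decreasing_by
  rename_i h
  split <;> omega

-- heapq._siftup(heap, 0)
def pySiftup (heap : List Int) : List Int :=
  let newitem := heap.getD 0 0
  let hp := pySiftupLoop heap 0 heap.length
  pySiftdown hp.1 0 hp.2 newitem

-- heapq.heappop(heap): returns (popped item, rest). heap.pop() on an empty list raises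
-- IndexError; that point is unreachable on inputs satisfying Pre_ ((0, []) stands for the raise).
def pyHeappop (heap : List Int) : Int × List Int :=
  match heap with
  | [] => (0, [])
  | _ :: _ =>
    let lastelt := heap.getLastD 0
    let rest := heap.dropLast
    match rest with
    | [] => (lastelt, [])
    | _ :: _ => (rest.getD 0 0, pySiftup (rest.set 0 lastelt))

def split_space (space : Int) : Int × Int :=
  let left := PySem.Int.floordiv (space - 1) 2
  let right := space - left - 1
  (left, right)

-- inner function inc(_space, _count)
def pyInc (spaces : List Int) (counts : PySem.Dict Int Int) (s c : Int) :
    List Int × PySem.Dict Int Int :=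
  if counts.contains s then
    (spaces, counts.insert s (counts.getD s 0 + c))
  else
    (pyHeappush spaces (-s), counts.insert s c)

-- the 'while True' loop of A; fuel only makes it total (it returns within num_stalls rounds
-- on every input satisfying Pre_).  'assert space >= 1' raises AssertionError where it fails
-- and counts.pop would raise KeyError on a missing key; both are unreachable under Pre_
-- (0 stands for the raise).
def pyLoopA (fuel : Nat) (spaces : List Int) (counts : PySem.Dict Int Int) (n : Int) : Int :=
  match fuel with
  | 0 => 0
  | fuel + 1 =>
    let p := pyHeappop spaces
    let space := -p.1
    if space < 1 then 0
    else
      let count := counts.getD space 0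
      let counts := counts.erase space
      if count ≥ n then space
      else
        let lr := split_space space
        let q := pyInc p.2 counts lr.1 count
        let r := pyInc q.1 q.2 lr.2 count
        pyLoopA fuel r.1 r.2 (n - count)

def find_space_for_nth (n : Int) (num_stalls : Int) : Int :=
  let init := pyInc [] PySem.Dict.empty num_stalls 1
  pyLoopA (num_stalls.toNat + 1) init.1 init.2 n

-- ===== PORT B =====
-- the 'while True' loop of B, same fuel discipline; max() on an empty dict raises ValueError
-- and 'assert s >= 1' raises AssertionError where it fails, both unreachable under Pre_
-- (0 stands for the raise).
def pyLoopB (fuel : Nat) (counts : PySem.Dict Int Int) (n : Int) : Int :=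
  match fuel with
  | 0 => 0
  | fuel + 1 =>
    match PySem.List.max? counts.keys id with
    | none => 0
    | some s =>
      if s < 1 then 0
      else
        let count := counts.getD s 0
        let counts := counts.erase s
        if count ≥ n then s
        else
          let left := PySem.Int.floordiv (s - 1) 2
          let right := s - left - 1
          let counts := counts.insert left (counts.getD left 0 + count)
          let counts := counts.insert right (counts.getD right 0 + count)
          pyLoopB fuel counts (n - count)

def find_space_for_nth_alt (n : Int) (num_stalls : Int) : Int :=
  pyLoopB (num_stalls.toNat + 1) ((PySem.Dict.empty).insert num_stalls 1) n

-- ===== PRECONDITION & SPEC =====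
-- Pre_ excludes exactly the inputs on which A raises: num_stalls < 1 (the first popped gap
-- already fails 'assert space >= 1') and n > num_stalls (all num_stalls seats get used up and
-- a gap of size 0 reaches the assert); B's assert raises on the same inputs.
def Pre_find_space_for_nth (n : Int) (num_stalls : Int) : Prop :=
  1 ≤ num_stalls ∧ n ≤ num_stalls
instance (n : Int) (num_stalls : Int) : Decidable (Pre_find_space_for_nth n num_stalls) := by
  unfold Pre_find_space_for_nth; infer_instance

def pvWitness_find_space_for_nth : Int × Int := (3, 5)

def Spec_find_space_for_nth (n : Int) (num_stalls : Int) (out : Int) : Prop := out = find_space_for_nth_alt n num_stalls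
instance (n : Int) (num_stalls : Int) (out : Int) : Decidable (Spec_find_space_for_nth n num_stalls out) := by unfold Spec_find_space_for_nth; infer_instance

-- ===== CLAIM (what is proved, stated in full; the proofs are below) =====
def Claim_equal_find_space_for_nth : Prop := ∀ (n : Int) (num_stalls : Int), Dom_find_space_for_nth n num_stalls → Pre_find_space_for_nth n num_stalls → Spec_find_space_for_nth n num_stalls (find_space_for_nth n num_stalls)

-- ===== LEMMAS AND PROOFS =====

-- Joint invariant of the two loop states: A's counts dict and B's counts dict coincide
-- (the loops below always run them in lock step), and the reachable shapes of that dict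
-- together with the exact layout of A's heap list are one of five patterns.
def HInv (spaces : List Int) (counts : PySem.Dict Int Int) : Prop :=
  (∃ a c, counts = PySem.Dict.mk [(a, c)] ∧ spaces = [-a]) ∨
  (∃ a c d, counts = PySem.Dict.mk [(a, c), (a + 1, d)] ∧ spaces = [-(a + 1), -a]) ∨
  (∃ a c d, counts = PySem.Dict.mk [(a + 1, d), (a, c)] ∧ spaces = [-(a + 1), -a]) ∨
  (∃ b c d, 1 ≤ b ∧ counts = PySem.Dict.mk [(2 * b, c), (b, d)] ∧ spaces = [-(2 * b), -b]) ∨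
  (∃ b c d e, 1 ≤ b ∧ counts = PySem.Dict.mk [(2 * b + 1, c), (b, d), (b + 1, e)] ∧
    spaces = [-(2 * b + 1), -b, -(b + 1)])

lemma pop1 (x : Int) : pyHeappop [x] = (x, []) := by simp [pyHeappop]

lemma pop2 (x y : Int) : pyHeappop [x, y] = (x, [y]) := by
  simp [pyHeappop, pySiftup, pySiftupLoop, pySiftdown]

lemma pop3 (x y z : Int) : pyHeappop [x, y, z] = (x, if z < y then [z, y] else [y, z]) := by
  simp [pyHeappop, pySiftup, pySiftupLoop, pySiftdown]

lemma push0 (x : Int) : pyHeappush [] x = [x] := by simp [pyHeappush, pySiftdown]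

lemma push1 (x y : Int) : pyHeappush [x] y = if y < x then [y, x] else [x, y] := by
  simp [pyHeappush, pySiftdown]

lemma push2 (x y z : Int) : pyHeappush [x, y] z = if z < x then [z, y, x] else [x, y, z] := by
  simp [pyHeappush, pySiftdown]

lemma stepC1 (fuel : Nat) (a c n : Int)
    (ih : ∀ (spaces : List Int) (counts : PySem.Dict Int Int) (n : Int),
      HInv spaces counts → pyLoopA fuel spaces counts n = pyLoopB fuel counts n) :
    pyLoopA (fuel + 1) [-a] (PySem.Dict.mk [(a, c)]) n =
      pyLoopB (fuel + 1) (PySem.Dict.mk [(a, c)]) n := by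
  have hmax : PySem.List.max? (PySem.Dict.mk [(a, c)]).keys id = some a := by
    simp [PySem.List.max?, PySem.Dict.keys]
  simp only [pyLoopA, pyLoopB, pop1, neg_neg, hmax]
  by_cases h1 : a < 1
  · simp [h1]
  · simp only [if_neg h1]
    have hg : (PySem.Dict.mk [(a, c)]).getD a 0 = c := by
      simp [PySem.Dict.getD, PySem.Dict.get?]
    have he : (PySem.Dict.mk [(a, c)]).erase a = PySem.Dict.mk [] := by
      simp [PySem.Dict.erase]
    simp only [hg, he]
    by_cases h2 : c ≥ n
    · simp [h2]
    · simp only [if_neg h2, ge_iff_le]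
      rcases Int.even_or_odd a with ⟨m, hm⟩ | ⟨m, hm⟩
      · -- a = 2m, continue; a ≥ 1 and even gives m ≥ 1
        have hm1 : 1 ≤ m := by omega
        have hl : PySem.Int.floordiv (a - 1) 2 = m - 1 := by
          simp only [PySem.Int.floordiv]
          rw [show a - 1 = 2 * m - 1 by omega, Int.fdiv_eq_ediv,
            if_pos (Or.inl (by norm_num : (0:Int) ≤ 2))]
          omega
        simp only [split_space, hl]
        rw [show a - (m - 1) - 1 = m by omega]
        have hq : pyInc [] (PySem.Dict.mk []) (m - 1) c =
            ([-(m - 1)], PySem.Dict.mk [(m - 1, c)]) := by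
          simp [pyInc, PySem.Dict.contains, push0, PySem.Dict.insert]
        have hr : pyInc [-(m - 1)] (PySem.Dict.mk [(m - 1, c)]) m c =
            ([-m, -(m - 1)], PySem.Dict.mk [(m - 1, c), (m, c)]) := by
          simp [pyInc, PySem.Dict.contains, push1, PySem.Dict.insert]
        simp only [hq, hr]
        have hB : ((PySem.Dict.mk []).insert (m - 1)
              ((PySem.Dict.mk []).getD (m - 1) 0 + c)) = PySem.Dict.mk [(m - 1, c)] := by
          simp [PySem.Dict.insert, PySem.Dict.getD, PySem.Dict.get?, PySem.Dict.contains]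
        rw [hB]
        have hB2 : ((PySem.Dict.mk [(m - 1, c)]).insert m
              ((PySem.Dict.mk [(m - 1, c)]).getD m 0 + c)) = PySem.Dict.mk [(m - 1, c), (m, c)] := by
          simp [PySem.Dict.insert, PySem.Dict.getD, PySem.Dict.get?, PySem.Dict.contains]
        rw [hB2]
        apply ih
        refine Or.inr (Or.inl ⟨m - 1, c, c, ?_, ?_⟩) <;> norm_num
      · -- a = 2m+1, continue: both pieces are m, second inc merges
        have hl : PySem.Int.floordiv (a - 1) 2 = m := by
          simp only [PySem.Int.floordiv]
          rw [show a - 1 = 2 * m by omega, Int.fdiv_eq_ediv,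
            if_pos (Or.inl (by norm_num : (0:Int) ≤ 2))]
          omega
        simp only [split_space, hl]
        rw [show a - m - 1 = m by omega]
        have hq : pyInc [] (PySem.Dict.mk []) m c =
            ([-m], PySem.Dict.mk [(m, c)]) := by
          simp [pyInc, PySem.Dict.contains, push0, PySem.Dict.insert]
        have hr : pyInc [-m] (PySem.Dict.mk [(m, c)]) m c =
            ([-m], PySem.Dict.mk [(m, c + c)]) := by
          simp [pyInc, PySem.Dict.contains, PySem.Dict.getD, PySem.Dict.get?, PySem.Dict.insert]
        simp only [hq, hr]
        have hB : ((PySem.Dict.mk []).insert m ((PySem.Dict.mk []).getD m 0 + c)) =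
            PySem.Dict.mk [(m, c)] := by
          simp [PySem.Dict.insert, PySem.Dict.getD, PySem.Dict.get?, PySem.Dict.contains]
        rw [hB]
        have hB2 : ((PySem.Dict.mk [(m, c)]).insert m
              ((PySem.Dict.mk [(m, c)]).getD m 0 + c)) = PySem.Dict.mk [(m, c + c)] := by
          simp [PySem.Dict.insert, PySem.Dict.getD, PySem.Dict.get?, PySem.Dict.contains]
        rw [hB2]
        apply ih
        exact Or.inl ⟨m, c + c, rfl, rfl⟩

lemma stepC2 (fuel : Nat) (a c d n : Int)
    (ih : ∀ (spaces : List Int) (counts : PySem.Dict Int Int) (n : Int),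
      HInv spaces counts → pyLoopA fuel spaces counts n = pyLoopB fuel counts n) :
    pyLoopA (fuel + 1) [-(a + 1), -a] (PySem.Dict.mk [(a, c), (a + 1, d)]) n =
      pyLoopB (fuel + 1) (PySem.Dict.mk [(a, c), (a + 1, d)]) n := by
  have hmax : PySem.List.max? (PySem.Dict.mk [(a, c), (a + 1, d)]).keys id = some (a + 1) := by
    simp [PySem.List.max?, PySem.Dict.keys]
  simp only [pyLoopA, pyLoopB, pop2, neg_neg, hmax]
  by_cases h1 : a + 1 < 1
  · simp [h1]
  · simp only [if_neg h1]
    have hg : (PySem.Dict.mk [(a, c), (a + 1, d)]).getD (a + 1) 0 = d := by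
      simp [PySem.Dict.getD, PySem.Dict.get?]
    have he : (PySem.Dict.mk [(a, c), (a + 1, d)]).erase (a + 1) = PySem.Dict.mk [(a, c)] := by
      simp [PySem.Dict.erase]
    simp only [hg, he]
    by_cases h2 : d ≥ n
    · simp [h2]
    · simp only [if_neg h2, ge_iff_le]
      rcases Int.even_or_odd a with ⟨m, hm⟩ | ⟨m, hm⟩
      · -- a = 2m even: pieces (m, m)
        have hl : PySem.Int.floordiv (a + 1 - 1) 2 = m := by
          simp only [PySem.Int.floordiv]
          rw [show a + 1 - 1 = 2 * m by omega, Int.fdiv_eq_ediv,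
            if_pos (Or.inl (by norm_num : (0:Int) ≤ 2))]
          omega
        simp only [split_space, hl]
        rw [show a + 1 - m - 1 = m by omega]
        by_cases hm0 : m = 0
        · -- a = 0: both pieces merge into the key a
          have ha : a = 0 := by omega
          subst ha
          rw [show m = (0:Int) by omega]
          have hq : pyInc [-(0:Int)] (PySem.Dict.mk [((0:Int), c)]) 0 d =
              ([-(0:Int)], PySem.Dict.mk [((0:Int), c + d)]) := by
            simp [pyInc, PySem.Dict.contains, PySem.Dict.getD, PySem.Dict.get?, PySem.Dict.insert]
          have hq2 : pyInc [-(0:Int)] (PySem.Dict.mk [((0:Int), c + d)]) 0 d =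
              ([-(0:Int)], PySem.Dict.mk [((0:Int), c + d + d)]) := by
            simp [pyInc, PySem.Dict.contains, PySem.Dict.getD, PySem.Dict.get?, PySem.Dict.insert]
          simp only [hq, hq2]
          have hB : ((PySem.Dict.mk [((0:Int), c)]).insert 0
                ((PySem.Dict.mk [((0:Int), c)]).getD 0 0 + d)) = PySem.Dict.mk [((0:Int), c + d)] := by
            simp [PySem.Dict.insert, PySem.Dict.getD, PySem.Dict.get?, PySem.Dict.contains]
          rw [hB]
          have hB2 : ((PySem.Dict.mk [((0:Int), c + d)]).insert 0
                ((PySem.Dict.mk [((0:Int), c + d)]).getD 0 0 + d)) = PySem.Dict.mk [((0:Int), c + d + d)] := by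
            simp [PySem.Dict.insert, PySem.Dict.getD, PySem.Dict.get?, PySem.Dict.contains]
          rw [hB2]
          apply ih
          exact Or.inl ⟨0, c + d + d, rfl, rfl⟩
        · -- m ≥ 1: first piece is a new key, second merges into it
          have hm1 : 1 ≤ m := by omega
          have hne : m ≠ a := by omega
          have hne' : a ≠ m := by omega
          have hq : pyInc [-a] (PySem.Dict.mk [(a, c)]) m d =
              ([-a, -m], PySem.Dict.mk [(a, c), (m, d)]) := by
            simp [pyInc, PySem.Dict.contains, push1, PySem.Dict.insert, hne, hne']
            omega
          have hq2 : pyInc [-a, -m] (PySem.Dict.mk [(a, c), (m, d)]) m d =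
              ([-a, -m], PySem.Dict.mk [(a, c), (m, d + d)]) := by
            simp [pyInc, PySem.Dict.contains, PySem.Dict.getD, PySem.Dict.get?,
              PySem.Dict.insert, hne']
          simp only [hq, hq2]
          have hB : ((PySem.Dict.mk [(a, c)]).insert m
                ((PySem.Dict.mk [(a, c)]).getD m 0 + d)) = PySem.Dict.mk [(a, c), (m, d)] := by
            simp [PySem.Dict.insert, PySem.Dict.getD, PySem.Dict.get?, PySem.Dict.contains, hne']
          rw [hB]
          have hB2 : ((PySem.Dict.mk [(a, c), (m, d)]).insert m
                ((PySem.Dict.mk [(a, c), (m, d)]).getD m 0 + d)) =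
              PySem.Dict.mk [(a, c), (m, d + d)] := by
            simp [PySem.Dict.insert, PySem.Dict.getD, PySem.Dict.get?, PySem.Dict.contains, hne']
          rw [hB2]
          apply ih
          refine Or.inr (Or.inr (Or.inr (Or.inl ⟨m, c, d + d, hm1, ?_, ?_⟩)))
          · rw [show 2 * m = a by omega]
          · rw [show 2 * m = a by omega]
      · -- a = 2m+1 odd: pieces (m, m+1), both new (m ≥ 1) or a = 1 special
        have hl : PySem.Int.floordiv (a + 1 - 1) 2 = m := by
          simp only [PySem.Int.floordiv]
          rw [show a + 1 - 1 = 2 * m + 1 by omega, Int.fdiv_eq_ediv,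
            if_pos (Or.inl (by norm_num : (0:Int) ≤ 2))]
          omega
        simp only [split_space, hl]
        rw [show a + 1 - m - 1 = m + 1 by omega]
        have hm0 : 0 ≤ m := by omega
        by_cases hm1 : m = 0
        · -- a = 1: piece 0 is new, piece 1 merges into the key a
          have ha : a = 1 := by omega
          subst ha
          rw [show m = (0:Int) by omega]
          have hq : pyInc [-(1:Int)] (PySem.Dict.mk [((1:Int), c)]) 0 d =
              ([-(1:Int), -(0:Int)], PySem.Dict.mk [((1:Int), c), ((0:Int), d)]) := by
            simp [pyInc, PySem.Dict.contains, push1, PySem.Dict.insert]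
          have hq2 : pyInc [-(1:Int), -(0:Int)] (PySem.Dict.mk [((1:Int), c), ((0:Int), d)]) (0 + 1) d =
              ([-(1:Int), -(0:Int)], PySem.Dict.mk [((1:Int), c + d), ((0:Int), d)]) := by
            simp [pyInc, PySem.Dict.contains, PySem.Dict.getD, PySem.Dict.get?, PySem.Dict.insert]
          simp only [hq, hq2]
          have hB : ((PySem.Dict.mk [((1:Int), c)]).insert 0
                ((PySem.Dict.mk [((1:Int), c)]).getD 0 0 + d)) =
              PySem.Dict.mk [((1:Int), c), ((0:Int), d)] := by
            simp [PySem.Dict.insert, PySem.Dict.getD, PySem.Dict.get?, PySem.Dict.contains]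
          rw [hB]
          have hB2 : ((PySem.Dict.mk [((1:Int), c), ((0:Int), d)]).insert (0 + 1)
                ((PySem.Dict.mk [((1:Int), c), ((0:Int), d)]).getD (0 + 1) 0 + d)) =
              PySem.Dict.mk [((1:Int), c + d), ((0:Int), d)] := by
            simp [PySem.Dict.insert, PySem.Dict.getD, PySem.Dict.get?, PySem.Dict.contains]
          rw [hB2]
          apply ih
          refine Or.inr (Or.inr (Or.inl ⟨0, d, c + d, ?_, ?_⟩)) <;> norm_num
        · -- m ≥ 1: both pieces are new keys
          have hm2 : 1 ≤ m := by omega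
          have hne1 : m ≠ a := by omega
          have hne1' : a ≠ m := by omega
          have hne2 : m + 1 ≠ a := by omega
          have hne2' : a ≠ m + 1 := by omega
          have hne3 : m + 1 ≠ m := by omega
          have hne3' : m ≠ m + 1 := by omega
          have hq : pyInc [-a] (PySem.Dict.mk [(a, c)]) m d =
              ([-a, -m], PySem.Dict.mk [(a, c), (m, d)]) := by
            simp [pyInc, PySem.Dict.contains, push1, PySem.Dict.insert, hne1, hne1']
            omega
          have hq2 : pyInc [-a, -m] (PySem.Dict.mk [(a, c), (m, d)]) (m + 1) d =
              ([-a, -m, -(m + 1)], PySem.Dict.mk [(a, c), (m, d), (m + 1, d)]) := by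
            simp [pyInc, PySem.Dict.contains, push2, PySem.Dict.insert, hne2', hne3']
            omega
          simp only [hq, hq2]
          have hB : ((PySem.Dict.mk [(a, c)]).insert m
                ((PySem.Dict.mk [(a, c)]).getD m 0 + d)) = PySem.Dict.mk [(a, c), (m, d)] := by
            simp [PySem.Dict.insert, PySem.Dict.getD, PySem.Dict.get?, PySem.Dict.contains, hne1']
          rw [hB]
          have hB2 : ((PySem.Dict.mk [(a, c), (m, d)]).insert (m + 1)
                ((PySem.Dict.mk [(a, c), (m, d)]).getD (m + 1) 0 + d)) =
              PySem.Dict.mk [(a, c), (m, d), (m + 1, d)] := by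
            simp [PySem.Dict.insert, PySem.Dict.getD, PySem.Dict.get?, PySem.Dict.contains,
              hne2', hne3']
          rw [hB2]
          apply ih
          refine Or.inr (Or.inr (Or.inr (Or.inr ⟨m, c, d, d, hm2, ?_, ?_⟩)))
          · rw [show 2 * m + 1 = a by omega]
          · rw [show 2 * m + 1 = a by omega]

-- one loop round does not depend on the insertion order of a two-key dict (A's loop)
lemma loopA_c2_comm (fuel : Nat) (a c d n : Int) :
    pyLoopA (fuel + 1) [-(a + 1), -a] (PySem.Dict.mk [(a + 1, d), (a, c)]) n =
      pyLoopA (fuel + 1) [-(a + 1), -a] (PySem.Dict.mk [(a, c), (a + 1, d)]) n := by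
  have hg : (PySem.Dict.mk [(a + 1, d), (a, c)]).getD (a + 1) 0 =
      (PySem.Dict.mk [(a, c), (a + 1, d)]).getD (a + 1) 0 := by
    simp [PySem.Dict.getD, PySem.Dict.get?]
  have he : (PySem.Dict.mk [(a + 1, d), (a, c)]).erase (a + 1) =
      (PySem.Dict.mk [(a, c), (a + 1, d)]).erase (a + 1) := by
    simp [PySem.Dict.erase]
  simp only [pyLoopA, pop2, neg_neg, hg, he]

-- the same for B's loop
lemma loopB_c2_comm (fuel : Nat) (a c d n : Int) :
    pyLoopB (fuel + 1) (PySem.Dict.mk [(a + 1, d), (a, c)]) n =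
      pyLoopB (fuel + 1) (PySem.Dict.mk [(a, c), (a + 1, d)]) n := by
  have hmax : PySem.List.max? (PySem.Dict.mk [(a + 1, d), (a, c)]).keys id = some (a + 1) := by
    simp [PySem.List.max?, PySem.Dict.keys]
  have hmax' : PySem.List.max? (PySem.Dict.mk [(a, c), (a + 1, d)]).keys id = some (a + 1) := by
    simp [PySem.List.max?, PySem.Dict.keys]
  have hg : (PySem.Dict.mk [(a + 1, d), (a, c)]).getD (a + 1) 0 =
      (PySem.Dict.mk [(a, c), (a + 1, d)]).getD (a + 1) 0 := by
    simp [PySem.Dict.getD, PySem.Dict.get?]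
  have he : (PySem.Dict.mk [(a + 1, d), (a, c)]).erase (a + 1) =
      (PySem.Dict.mk [(a, c), (a + 1, d)]).erase (a + 1) := by
    simp [PySem.Dict.erase]
  simp only [pyLoopB, hmax, hmax', hg, he]

lemma stepC2d (fuel : Nat) (a c d n : Int)
    (ih : ∀ (spaces : List Int) (counts : PySem.Dict Int Int) (n : Int),
      HInv spaces counts → pyLoopA fuel spaces counts n = pyLoopB fuel counts n) :
    pyLoopA (fuel + 1) [-(a + 1), -a] (PySem.Dict.mk [(a + 1, d), (a, c)]) n =
      pyLoopB (fuel + 1) (PySem.Dict.mk [(a + 1, d), (a, c)]) n := by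
  rw [loopA_c2_comm, loopB_c2_comm]
  exact stepC2 fuel a c d n ih

lemma stepC3 (fuel : Nat) (b c d n : Int) (hb : 1 ≤ b)
    (ih : ∀ (spaces : List Int) (counts : PySem.Dict Int Int) (n : Int),
      HInv spaces counts → pyLoopA fuel spaces counts n = pyLoopB fuel counts n) :
    pyLoopA (fuel + 1) [-(2 * b), -b] (PySem.Dict.mk [(2 * b, c), (b, d)]) n =
      pyLoopB (fuel + 1) (PySem.Dict.mk [(2 * b, c), (b, d)]) n := by
  have hne : b ≠ 2 * b := by omega
  have hne' : 2 * b ≠ b := by omega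
  have hmax : PySem.List.max? (PySem.Dict.mk [(2 * b, c), (b, d)]).keys id = some (2 * b) := by
    simp [PySem.List.max?, PySem.Dict.keys]
    omega
  simp only [pyLoopA, pyLoopB, pop2, neg_neg, hmax]
  have h1 : ¬ (2 * b < 1) := by omega
  simp only [if_neg h1]
  have hg : (PySem.Dict.mk [(2 * b, c), (b, d)]).getD (2 * b) 0 = c := by
    simp [PySem.Dict.getD, PySem.Dict.get?]
  have he : (PySem.Dict.mk [(2 * b, c), (b, d)]).erase (2 * b) = PySem.Dict.mk [(b, d)] := by
    simp [PySem.Dict.erase, hne]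
  simp only [hg, he]
  by_cases h2 : c ≥ n
  · simp [h2]
  · simp only [if_neg h2, ge_iff_le]
    have hl : PySem.Int.floordiv (2 * b - 1) 2 = b - 1 := by
      simp only [PySem.Int.floordiv]
      rw [Int.fdiv_eq_ediv, if_pos (Or.inl (by norm_num : (0:Int) ≤ 2))]
      omega
    simp only [split_space, hl]
    rw [show 2 * b - (b - 1) - 1 = b by omega]
    have hne2 : b - 1 ≠ b := by omega
    have hne2' : b ≠ b - 1 := by omega
    have hq : pyInc [-b] (PySem.Dict.mk [(b, d)]) (b - 1) c =
        ([-b, -(b - 1)], PySem.Dict.mk [(b, d), (b - 1, c)]) := by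
      simp [pyInc, PySem.Dict.contains, push1, PySem.Dict.insert, hne2']
    have hq2 : pyInc [-b, -(b - 1)] (PySem.Dict.mk [(b, d), (b - 1, c)]) b c =
        ([-b, -(b - 1)], PySem.Dict.mk [(b, d + c), (b - 1, c)]) := by
      simp [pyInc, PySem.Dict.contains, PySem.Dict.getD, PySem.Dict.get?, PySem.Dict.insert]
    simp only [hq, hq2]
    have hB : ((PySem.Dict.mk [(b, d)]).insert (b - 1)
          ((PySem.Dict.mk [(b, d)]).getD (b - 1) 0 + c)) = PySem.Dict.mk [(b, d), (b - 1, c)] := by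
      simp [PySem.Dict.insert, PySem.Dict.getD, PySem.Dict.get?, PySem.Dict.contains, hne2']
    rw [hB]
    have hB2 : ((PySem.Dict.mk [(b, d), (b - 1, c)]).insert b
          ((PySem.Dict.mk [(b, d), (b - 1, c)]).getD b 0 + c)) =
        PySem.Dict.mk [(b, d + c), (b - 1, c)] := by
      simp [PySem.Dict.insert, PySem.Dict.getD, PySem.Dict.get?, PySem.Dict.contains, hne2]
    rw [hB2]
    apply ih
    refine Or.inr (Or.inr (Or.inl ⟨b - 1, c, d + c, ?_, ?_⟩)) <;> norm_num

lemma stepC4 (fuel : Nat) (b c d e n : Int) (hb : 1 ≤ b)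
    (ih : ∀ (spaces : List Int) (counts : PySem.Dict Int Int) (n : Int),
      HInv spaces counts → pyLoopA fuel spaces counts n = pyLoopB fuel counts n) :
    pyLoopA (fuel + 1) [-(2 * b + 1), -b, -(b + 1)]
        (PySem.Dict.mk [(2 * b + 1, c), (b, d), (b + 1, e)]) n =
      pyLoopB (fuel + 1) (PySem.Dict.mk [(2 * b + 1, c), (b, d), (b + 1, e)]) n := by
  have hne1 : b ≠ 2 * b + 1 := by omega
  have hne1' : 2 * b + 1 ≠ b := by omega
  have hne2 : b + 1 ≠ 2 * b + 1 := by omega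
  have hne2' : 2 * b + 1 ≠ b + 1 := by omega
  have hne3 : b ≠ b + 1 := by omega
  have hne3' : b + 1 ≠ b := by omega
  have hmax : PySem.List.max? (PySem.Dict.mk [(2 * b + 1, c), (b, d), (b + 1, e)]).keys id =
      some (2 * b + 1) := by
    have g1 : ¬ (2 * b + 1 < b) := by omega
    have g2 : ¬ (2 * b + 1 ≤ b) := by omega
    simp [PySem.List.max?, PySem.Dict.keys, g1, g2]
  have hpop : pyHeappop [-(2 * b + 1), -b, -(b + 1)] = (-(2 * b + 1), [-(b + 1), -b]) := by
    rw [pop3, if_pos (by omega : -(b + 1) < -b)]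
  simp only [pyLoopA, pyLoopB, hpop, neg_neg, hmax]
  have h1 : ¬ (2 * b + 1 < 1) := by omega
  simp only [if_neg h1]
  have hg : (PySem.Dict.mk [(2 * b + 1, c), (b, d), (b + 1, e)]).getD (2 * b + 1) 0 = c := by
    simp [PySem.Dict.getD, PySem.Dict.get?]
  have he : (PySem.Dict.mk [(2 * b + 1, c), (b, d), (b + 1, e)]).erase (2 * b + 1) =
      PySem.Dict.mk [(b, d), (b + 1, e)] := by
    simp [PySem.Dict.erase, hne1, hne2]
  simp only [hg, he]
  by_cases h2 : c ≥ n
  · simp [h2]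
  · simp only [if_neg h2, ge_iff_le]
    have hl : PySem.Int.floordiv (2 * b + 1 - 1) 2 = b := by
      simp only [PySem.Int.floordiv]
      rw [show 2 * b + 1 - 1 = 2 * b by omega, Int.fdiv_eq_ediv,
        if_pos (Or.inl (by norm_num : (0:Int) ≤ 2))]
      omega
    simp only [split_space, hl]
    rw [show 2 * b + 1 - b - 1 = b by omega]
    have hq : pyInc [-(b + 1), -b] (PySem.Dict.mk [(b, d), (b + 1, e)]) b c =
        ([-(b + 1), -b], PySem.Dict.mk [(b, d + c), (b + 1, e)]) := by
      simp [pyInc, PySem.Dict.contains, PySem.Dict.getD, PySem.Dict.get?, PySem.Dict.insert,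
        hne3']
    have hq2 : pyInc [-(b + 1), -b] (PySem.Dict.mk [(b, d + c), (b + 1, e)]) b c =
        ([-(b + 1), -b], PySem.Dict.mk [(b, d + c + c), (b + 1, e)]) := by
      simp [pyInc, PySem.Dict.contains, PySem.Dict.getD, PySem.Dict.get?, PySem.Dict.insert,
        hne3']
    simp only [hq, hq2]
    have hB : ((PySem.Dict.mk [(b, d), (b + 1, e)]).insert b
          ((PySem.Dict.mk [(b, d), (b + 1, e)]).getD b 0 + c)) =
        PySem.Dict.mk [(b, d + c), (b + 1, e)] := by
      simp [PySem.Dict.insert, PySem.Dict.getD, PySem.Dict.get?, PySem.Dict.contains,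
        hne3']
    rw [hB]
    have hB2 : ((PySem.Dict.mk [(b, d + c), (b + 1, e)]).insert b
          ((PySem.Dict.mk [(b, d + c), (b + 1, e)]).getD b 0 + c)) =
        PySem.Dict.mk [(b, d + c + c), (b + 1, e)] := by
      simp [PySem.Dict.insert, PySem.Dict.getD, PySem.Dict.get?, PySem.Dict.contains,
        hne3']
    rw [hB2]
    apply ih
    exact Or.inr (Or.inl ⟨b, d + c + c, e, rfl, rfl⟩)

lemma loop_agree (fuel : Nat) : ∀ (spaces : List Int) (counts : PySem.Dict Int Int) (n : Int),
    HInv spaces counts → pyLoopA fuel spaces counts n = pyLoopB fuel counts n := by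
  induction fuel with
  | zero => intro spaces counts n _; rfl
  | succ fuel ih =>
    rintro spaces counts n
      (⟨a, c, hc, hs⟩ | ⟨a, c, d, hc, hs⟩ | ⟨a, c, d, hc, hs⟩ |
        ⟨b, c, d, hb, hc, hs⟩ | ⟨b, c, d, e, hb, hc, hs⟩) <;> subst hc <;> subst hs
    · exact stepC1 fuel a c n ih
    · exact stepC2 fuel a c d n ih
    · exact stepC2d fuel a c d n ih
    · exact stepC3 fuel b c d n hb ih
    · exact stepC4 fuel b c d e n hb ih

-- ===== VERDICT (by name: the statement is the Claim_ definition above) =====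
theorem find_space_for_nth_spec : Claim_equal_find_space_for_nth := by
  intro n num_stalls _hdom _hpre
  unfold Spec_find_space_for_nth find_space_for_nth find_space_for_nth_alt
  have hinit : pyInc [] PySem.Dict.empty num_stalls 1 =
      ([-num_stalls], PySem.Dict.empty.insert num_stalls 1) := by
    simp [pyInc, pyHeappush, pySiftdown, PySem.Dict.contains, PySem.Dict.empty]
  rw [hinit]
  exact loop_agree _ _ _ n (Or.inl ⟨num_stalls, 1, by rfl, rfl⟩)
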